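-- pv_equiv track=rewrite | github.com/barrachri/rover | rover/__init__.py | pilot
-- ===== SOURCE A (Python) =====
-- from typing import Tuple
--
-- positionType = Tuple[int, int, str]
--
-- DIRECTIONS = ("NORTH", "EAST", "SOUTH", "WEST")
--
-- def validate_direction(direction: str) -> None:
--     """Validate if direction is supported"""
--     if direction not in DIRECTIONS:
--         raise ValueError(f"Invalid direction, direction should be one of {DIRECTIONS}")
--
-- def pilot(command: str, x: int, y: int, direction: str) -> positionType:
--     """
--     A flight controller with a specific controlling logic.
--
--     args:
--         command: a single or multiple instructions.
--         x, y: current position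
--         direction: heading direction
--
--     return the new position.
--     """
--     logic = {
--         "F": {
--             # heading, x, y
--             "NORTH": (0, 1),
--             "EAST": (1, 0),
--             "SOUTH": (0, -1),
--             "WEST": (-1, 0),
--         }
--     }
--
--     # the command we receive must be a subset
--     # of the instructions implemented inside logic
--     if (set(command) <= logic.keys()) is False:
--         raise ValueError("Instruction error: `{command}` not valid")
--
--     validate_direction(direction)
--
--     for instruction in command:
--         execution_plan = logic[instruction]
--         x += execution_plan[direction][0]
--         y += execution_plan[direction][1]
--
--     return x, y, direction
-- ===== SOURCE B (Python) =====
-- DIRECTIONS = ("NORTH", "EAST", "SOUTH", "WEST")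
--
-- def validate_direction(direction: str) -> None:
--     if direction not in DIRECTIONS:
--         raise ValueError(f"Invalid direction, direction should be one of {DIRECTIONS}")
--
-- def pilot(command: str, x: int, y: int, direction: str):
--     if not set(command) <= {"F"}:
--         raise ValueError("Instruction error: `{command}` not valid")
--     validate_direction(direction)
--     dx, dy = {"NORTH": (0, 1), "EAST": (1, 0), "SOUTH": (0, -1), "WEST": (-1, 0)}[direction]
--     n = len(command)
--     return x + n * dx, y + n * dy, direction
-- ===== Notes on version B (the rewrite author's own statement) =====
-- stated objective: simpler
-- what changed: Replaces A's per-character loop with a single closed-form step: look up the direction's (dx,dy) once and return (x + len(command)*dx, y + len(command)*dy, direction).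
import Mathlib
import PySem

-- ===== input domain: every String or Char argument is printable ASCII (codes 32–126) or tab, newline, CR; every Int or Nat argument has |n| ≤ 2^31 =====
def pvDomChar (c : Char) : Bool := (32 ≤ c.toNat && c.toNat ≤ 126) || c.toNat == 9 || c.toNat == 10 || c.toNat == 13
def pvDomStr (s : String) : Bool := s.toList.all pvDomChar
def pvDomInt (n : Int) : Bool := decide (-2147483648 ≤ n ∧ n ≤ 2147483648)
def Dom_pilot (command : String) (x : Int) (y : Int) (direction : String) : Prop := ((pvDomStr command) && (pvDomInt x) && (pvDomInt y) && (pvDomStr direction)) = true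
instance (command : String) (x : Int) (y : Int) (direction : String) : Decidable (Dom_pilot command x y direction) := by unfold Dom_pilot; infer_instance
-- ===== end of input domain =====

-- B replaces A's per-character loop by one closed-form step: len(command) * delta (simpler; same cost, validation still scans the command).

-- ===== PORT A =====
-- logic["F"][direction] of A, as a lookup chain in the dict's insertion order
def pilotDelta (direction : String) : Int × Int :=
  if direction = "NORTH" then (0, 1)
  else if direction = "EAST" then (1, 0)
  else if direction = "SOUTH" then (0, -1)
  else (-1, 0)

def pilot (command : String) (x : Int) (y : Int) (direction : String) : Int × Int × String :=
  -- the for loop over command's characters, each adding the delta for `direction`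
  let r := command.toList.foldl
    (fun (p : Int × Int) (_instruction : Char) =>
      let ep := pilotDelta direction
      (p.1 + ep.1, p.2 + ep.2)) (x, y)
  (r.1, r.2, direction)

-- ===== PORT B =====
def pilot_alt (command : String) (x : Int) (y : Int) (direction : String) : Int × Int × String :=
  let d := pilotDelta direction
  let n : Int := (command.toList.length : Int)
  (x + n * d.1, y + n * d.2, direction)

-- ===== PRECONDITION & SPEC =====
-- Pre_ excludes exactly the inputs where A raises ValueError: a command with a
-- character other than 'F', or a direction outside DIRECTIONS.
def Pre_pilot (command : String) (x : Int) (y : Int) (direction : String) : Prop :=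
  command.toList.all (· = 'F') = true ∧
  direction ∈ ["NORTH", "EAST", "SOUTH", "WEST"]
instance (command : String) (x : Int) (y : Int) (direction : String) : Decidable (Pre_pilot command x y direction) := by unfold Pre_pilot; infer_instance

def pvWitness_pilot : String × Int × Int × String := ("FFF", 2, -1, "EAST")

def Spec_pilot (command : String) (x : Int) (y : Int) (direction : String) (out : Int × Int × String) : Prop := out = pilot_alt command x y direction
instance (command : String) (x : Int) (y : Int) (direction : String) (out : Int × Int × String) : Decidable (Spec_pilot command x y direction out) := by unfold Spec_pilot; infer_instance

-- ===== CLAIM (what is proved, stated in full; the proofs are below) =====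
def Claim_equal_pilot : Prop := ∀ (command : String) (x : Int) (y : Int) (direction : String), Dom_pilot command x y direction → Pre_pilot command x y direction → Spec_pilot command x y direction (pilot command x y direction)

-- ===== LEMMAS AND PROOFS =====
theorem pilot_foldl (direction : String) (l : List Char) (x y : Int) :
    l.foldl (fun (p : Int × Int) (_ : Char) =>
      let ep := pilotDelta direction
      (p.1 + ep.1, p.2 + ep.2)) (x, y)
    = (x + (l.length : Int) * (pilotDelta direction).1,
       y + (l.length : Int) * (pilotDelta direction).2) := by
  induction l generalizing x y with
  | nil => simp
  | cons c t ih =>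
    simp only [List.foldl_cons, ih, List.length_cons]
    apply Prod.ext <;> push_cast <;> ring

-- ===== VERDICT (by name: the statement is the Claim_ definition above) =====
theorem pilot_spec : Claim_equal_pilot := by
  intro command x y direction _ _
  unfold Spec_pilot pilot pilot_alt
  simp only [pilot_foldl]
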